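-- pv_equiv track=rewrite | github.com/HoaLe69/DSA2025_MOOC_PI | efficient_algorithms/bit_string.py | count_ways2
-- ===== SOURCE A (Python) =====
-- def count_ways2(bits):
--     count = 0
--     n = len(bits)
--     zeros = 0
--     for i in range(n):
--         if bits[i] == "0":
--             zeros += 1
--         else:
--             count += zeros
--     return count
-- ===== SOURCE B (Python) =====
-- def count_ways2(bits):
--     # Divide and conquer: go(s) returns (pairs, zeros, ones) for s,
--     # where pairs = number of (i<j) with s[i]=='0' and s[j]!='0'.
--     # A '01' pair either lies in one half or straddles: zeros_L * ones_R.
--     def go(s):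
--         n = len(s)
--         if n == 0:
--             return (0, 0, 0)
--         if n == 1:
--             return (0, 1, 0) if s[0] == "0" else (0, 0, 1)
--         m = n // 2
--         c1, z1, o1 = go(s[:m])
--         c2, z2, o2 = go(s[m:])
--         return (c1 + c2 + z1 * o2, z1 + z2, o1 + o2)
--     return go(bits)[0]
-- ===== Notes on version B (the rewrite author's own statement) =====
-- stated objective: alternative
-- what changed: B replaces A's single forward pass with a zeros-so-far counter by a recursive divide-and-conquer: each half returns (pairs, zeros, ones) and the combine step adds zeros_left * ones_right for the straddling pairs.
import Mathlib
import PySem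

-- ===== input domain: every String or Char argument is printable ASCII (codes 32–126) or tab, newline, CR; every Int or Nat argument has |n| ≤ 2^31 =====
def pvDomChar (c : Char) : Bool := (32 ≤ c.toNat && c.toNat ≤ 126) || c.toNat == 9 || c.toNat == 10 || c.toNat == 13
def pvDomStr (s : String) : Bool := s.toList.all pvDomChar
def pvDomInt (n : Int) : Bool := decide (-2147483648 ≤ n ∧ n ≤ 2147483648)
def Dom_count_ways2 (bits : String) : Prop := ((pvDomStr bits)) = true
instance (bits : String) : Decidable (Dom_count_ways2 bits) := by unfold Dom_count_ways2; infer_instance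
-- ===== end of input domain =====

-- B replaces A's single forward scan by a divide-and-conquer recursion combining
-- (pairs, zeros, ones) of the two halves; same values, different algorithm.

-- ===== PORT A =====
-- forward loop over range(n), indexing bits[i] (always in range, so pyGetD with an unreachable default)
def count_ways2 (bits : String) : Int :=
  ((PySem.List.pyRange 0 (PySem.Str.len bits) 1).foldl
    (fun (st : Int × Int) i =>
      if PySem.List.pyGetD bits.toList i '?' = '0' then (st.1, st.2 + 1) else (st.1 + st.2, st.2))
    (0, 0)).1

-- ===== PORT B =====
-- go(s): returns (pairs, zeros, ones); split at n // 2, combine with zeros_L * ones_R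
def pvGo : List Char → Int × Int × Int
  | [] => (0, 0, 0)
  | [c] => if c = '0' then (0, 1, 0) else (0, 0, 1)
  | a :: b :: t =>
      let l := a :: b :: t
      let m := l.length / 2
      let r1 := pvGo (l.take m)
      let r2 := pvGo (l.drop m)
      (r1.1 + r2.1 + r1.2.1 * r2.2.2, r1.2.1 + r2.2.1, r1.2.2 + r2.2.2)
  termination_by l => l.length
  decreasing_by
    · simp; omega
    · simp; omega

def count_ways2_alt (bits : String) : Int := (pvGo bits.toList).1

-- ===== PRECONDITION & SPEC =====
def Spec_count_ways2 (bits : String) (out : Int) : Prop := out = count_ways2_alt bits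
instance (bits : String) (out : Int) : Decidable (Spec_count_ways2 bits out) := by unfold Spec_count_ways2; infer_instance

-- ===== CLAIM (what is proved, stated in full; the proofs are below) =====
def Claim_equal_count_ways2 : Prop := ∀ (bits : String), Dom_count_ways2 bits → Spec_count_ways2 bits (count_ways2 bits)

-- ===== LEMMAS AND PROOFS =====

-- number of non-'0' characters
def pvN : List Char → Int
  | [] => 0
  | c :: t => if c = '0' then pvN t else pvN t + 1

-- number of '0' characters
def pvZ : List Char → Int
  | [] => 0
  | c :: t => if c = '0' then pvZ t + 1 else pvZ t

-- number of (i<j) pairs with l[i]='0', l[j]≠'0'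
def pvS : List Char → Int
  | [] => 0
  | c :: t => if c = '0' then pvS t + pvN t else pvS t

theorem pvN_append (a b : List Char) : pvN (a ++ b) = pvN a + pvN b := by
  induction a with
  | nil => simp [pvN]
  | cons c t ih => by_cases h : c = '0' <;> simp [pvN, h, ih] <;> ring

theorem pvZ_append (a b : List Char) : pvZ (a ++ b) = pvZ a + pvZ b := by
  induction a with
  | nil => simp [pvZ]
  | cons c t ih => by_cases h : c = '0' <;> simp [pvZ, h, ih] <;> ring

theorem pvS_append (a b : List Char) :
    pvS (a ++ b) = pvS a + pvS b + pvZ a * pvN b := by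
  induction a with
  | nil => simp [pvS, pvZ]
  | cons c t ih =>
    by_cases h : c = '0' <;> simp [pvS, pvZ, h, ih, pvN_append] <;> ring

theorem pvGo_eq_aux (n : Nat) : ∀ l : List Char, l.length ≤ n → pvGo l = (pvS l, pvZ l, pvN l) := by
  induction n with
  | zero =>
    intro l h
    have : l = [] := List.eq_nil_of_length_eq_zero (Nat.le_zero.mp h)
    subst this; simp [pvGo, pvS, pvZ, pvN]
  | succ n ih =>
    intro l h
    match l with
    | [] => simp [pvGo, pvS, pvZ, pvN]
    | [c] => by_cases hc : c = '0' <;> simp [pvGo, pvS, pvZ, pvN, hc]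
    | a :: b :: t =>
      rw [pvGo]
      have h1 : ((a :: b :: t).take ((a :: b :: t).length / 2)).length ≤ n := by
        simp at h ⊢; omega
      have h2 : ((a :: b :: t).drop ((a :: b :: t).length / 2)).length ≤ n := by
        simp at h ⊢; omega
      rw [ih _ h1, ih _ h2]
      have e : (a :: b :: t)
          = (a :: b :: t).take ((a :: b :: t).length / 2)
            ++ (a :: b :: t).drop ((a :: b :: t).length / 2) :=
        (List.take_append_drop _ _).symm
      conv_rhs => rw [e]
      rw [pvS_append, pvZ_append, pvN_append]

theorem pvGo_eq (l : List Char) : pvGo l = (pvS l, pvZ l, pvN l) :=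
  pvGo_eq_aux l.length l le_rfl

theorem pvA_foldl (l : List Char) (c z : Int) :
    l.foldl (fun (st : Int × Int) ch =>
      if ch = '0' then (st.1, st.2 + 1) else (st.1 + st.2, st.2)) (c, z)
    = (c + pvS l + z * pvN l, z + pvZ l) := by
  induction l generalizing c z with
  | nil => simp [pvS, pvN, pvZ]
  | cons ch t ih =>
    by_cases h : ch = '0' <;>
      simp [List.foldl_cons, h, ih, pvS, pvN, pvZ] <;>
      (try constructor) <;> ring

theorem pvA_eq (bits : String) : count_ways2 bits = pvS bits.toList := by
  unfold count_ways2
  rw [PySem.Str.len_eq,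
    PySem.List.foldl_pyRange_zero_pyGetD' bits.toList '?'
      (fun (st : Int × Int) ch => if ch = '0' then (st.1, st.2 + 1) else (st.1 + st.2, st.2)) (0, 0),
    pvA_foldl]
  simp

-- ===== VERDICT (by name: the statement is the Claim_ definition above) =====
theorem count_ways2_spec : Claim_equal_count_ways2 := by
  intro bits _
  unfold Spec_count_ways2 count_ways2_alt
  rw [pvA_eq, pvGo_eq]
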